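-- pv_equiv track=rewrite | github.com/rezacodev/aplikasi-obe | desain/03_Calculation_Engine.py | _get_cpl_status
-- ===== SOURCE A (Python) =====
-- from typing import List, Dict, Optional, Tuple
--
-- def _get_cpl_status(cpl_per_mk_results: List[Dict]) -> str:
--     """Determine CPL status based on I/R/M/A distribution"""
--     statuses = [row['status_dalam_mk'] for row in cpl_per_mk_results]
--
--     if 'A' in statuses:
--         return 'assessed'
--     elif 'M' in statuses:
--         return 'master'
--     elif 'R' in statuses:
--         return 'reinforce'
--     elif 'I' in statuses:
--         return 'introduce'
--     else:
--         return 'belum_dimulai'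
-- ===== SOURCE B (Python) =====
-- from typing import List, Dict
--
-- _PRIORITY = {'I': 1, 'R': 2, 'M': 3, 'A': 4}
-- _BY_PRIORITY = {4: 'assessed', 3: 'master', 2: 'reinforce', 1: 'introduce'}
--
-- def _get_cpl_status(cpl_per_mk_results: List[Dict]) -> str:
--     """Determine CPL status based on I/R/M/A distribution (single pass over rows)."""
--     best = 0
--     for row in cpl_per_mk_results:
--         best = max(best, _PRIORITY.get(row['status_dalam_mk'], 0))
--     return _BY_PRIORITY.get(best, 'belum_dimulai')
-- ===== Notes on version B (the rewrite author's own statement) =====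
-- stated objective: alternative
-- what changed: Replaces the build-full-status-list-then-four-membership-scans if/elif chain by a single pass that folds the maximum of a numeric priority (I=1,R=2,M=3,A=4, other 0) per row and translates the max back through a fixed table.
import Mathlib
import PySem

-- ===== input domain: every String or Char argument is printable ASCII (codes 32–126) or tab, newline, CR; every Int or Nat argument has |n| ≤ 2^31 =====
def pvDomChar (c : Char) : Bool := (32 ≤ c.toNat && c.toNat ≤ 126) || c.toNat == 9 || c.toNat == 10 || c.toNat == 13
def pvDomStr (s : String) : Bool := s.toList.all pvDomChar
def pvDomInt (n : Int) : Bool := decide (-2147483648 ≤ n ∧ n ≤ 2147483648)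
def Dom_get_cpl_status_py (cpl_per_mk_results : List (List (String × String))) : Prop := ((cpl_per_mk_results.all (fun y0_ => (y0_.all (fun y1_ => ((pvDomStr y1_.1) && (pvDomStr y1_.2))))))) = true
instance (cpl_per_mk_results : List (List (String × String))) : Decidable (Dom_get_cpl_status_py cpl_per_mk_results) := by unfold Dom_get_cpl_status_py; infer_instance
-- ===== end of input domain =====

-- B folds the maximum numeric priority (I=1,R=2,M=3,A=4, other 0) in one pass instead of
-- A's full status list plus up to four membership scans; return values agree everywhere
-- both return (equivalence about the RETURN value; neither mutates its argument).

-- ===== PORT A =====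
-- row['status_dalam_mk']: raises KeyError when the key is missing; ported via Dict.get?
-- with a "" default, and exactly those inputs are excluded by Pre_ below.
def pvRowStatusA (row : List (String × String)) : String :=
  ((PySem.Dict.mk row).get? "status_dalam_mk").getD ""

def get_cpl_status_py (cpl_per_mk_results : List (List (String × String))) : String :=
  let statuses := cpl_per_mk_results.map pvRowStatusA
  if statuses.contains "A" then "assessed"
  else if statuses.contains "M" then "master"
  else if statuses.contains "R" then "reinforce"
  else if statuses.contains "I" then "introduce"
  else "belum_dimulai"

-- ===== PORT B =====
-- _PRIORITY.get(s, 0)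
def pvPrio (s : String) : Nat :=
  ((PySem.Dict.mk [("I", (1:Nat)), ("R", 2), ("M", 3), ("A", 4)]).get? s).getD 0

-- _BY_PRIORITY.get(best, 'belum_dimulai')
def pvStatusOf (m : Nat) : String :=
  ((PySem.Dict.mk [((4:Nat), "assessed"), (3, "master"), (2, "reinforce"), (1, "introduce")]).get? m).getD "belum_dimulai"

-- B's row['status_dalam_mk'] access (same KeyError domain as A's)
def pvRowStatusB (row : List (String × String)) : String :=
  ((PySem.Dict.mk row).get? "status_dalam_mk").getD ""

def get_cpl_status_py_alt (cpl_per_mk_results : List (List (String × String))) : String :=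
  pvStatusOf (cpl_per_mk_results.foldl (fun best row => max best (pvPrio (pvRowStatusB row))) 0)

-- ===== PRECONDITION & SPEC =====
-- Pre_ excludes exactly the rows missing the key 'status_dalam_mk', on which both
-- Pythons raise KeyError.
def Pre_get_cpl_status_py (cpl_per_mk_results : List (List (String × String))) : Prop :=
  (cpl_per_mk_results.all (fun row => (PySem.Dict.mk row).contains "status_dalam_mk")) = true
instance (cpl_per_mk_results : List (List (String × String))) : Decidable (Pre_get_cpl_status_py cpl_per_mk_results) := by unfold Pre_get_cpl_status_py; infer_instance

def pvWitness_get_cpl_status_py : (List (List (String × String))) :=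
  [[("status_dalam_mk", "I")], [("status_dalam_mk", "M")]]

def Spec_get_cpl_status_py (cpl_per_mk_results : List (List (String × String))) (out : String) : Prop := out = get_cpl_status_py_alt cpl_per_mk_results
instance (cpl_per_mk_results : List (List (String × String))) (out : String) : Decidable (Spec_get_cpl_status_py cpl_per_mk_results out) := by unfold Spec_get_cpl_status_py; infer_instance

-- ===== CLAIM (what is proved, stated in full; the proofs are below) =====
def Claim_equal_get_cpl_status_py : Prop := ∀ (cpl_per_mk_results : List (List (String × String))), Dom_get_cpl_status_py cpl_per_mk_results → Pre_get_cpl_status_py cpl_per_mk_results → Spec_get_cpl_status_py cpl_per_mk_results (get_cpl_status_py cpl_per_mk_results)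

-- ===== LEMMAS AND PROOFS =====

theorem pvPrio_eq (s : String) :
    pvPrio s = if s = "A" then 4 else if s = "M" then 3 else if s = "R" then 2
               else if s = "I" then 1 else 0 := by
  by_cases hA : s = "A"
  · subst hA; simp [pvPrio, PySem.Dict.get?_mk_cons]
  by_cases hM : s = "M"
  · subst hM; simp [pvPrio, PySem.Dict.get?_mk_cons]
  by_cases hR : s = "R"
  · subst hR; simp [pvPrio, PySem.Dict.get?_mk_cons]
  by_cases hI : s = "I"
  · subst hI; simp [pvPrio, PySem.Dict.get?_mk_cons]
  · have hA2 : ¬ ("A" = s) := fun h => hA h.symm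
    have hM2 : ¬ ("M" = s) := fun h => hM h.symm
    have hR2 : ¬ ("R" = s) := fun h => hR h.symm
    have hI2 : ¬ ("I" = s) := fun h => hI h.symm
    simp [pvPrio, PySem.Dict.get?,
          hA, hM, hR, hI, hA2, hM2, hR2, hI2]

theorem pvPrio_le (s : String) : pvPrio s ≤ 4 := by
  rw [pvPrio_eq]; split_ifs <;> omega

-- fold of max with a nonzero accumulator
theorem foldl_max_acc (g : List (String × String) → Nat)
    (rs : List (List (String × String))) (a : Nat) :
    rs.foldl (fun b row => max b (g row)) a
      = max a (rs.foldl (fun b row => max b (g row)) 0) := by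
  induction rs generalizing a with
  | nil => simp
  | cons r t ih =>
    simp only [List.foldl_cons]
    rw [ih, ih (max 0 (g r))]
    omega

def pvM (rs : List (List (String × String))) : Nat :=
  rs.foldl (fun b row => max b (pvPrio (pvRowStatusA row))) 0

theorem pvM_cons (r : List (String × String)) (rs : List (List (String × String))) :
    pvM (r :: rs) = max (pvPrio (pvRowStatusA r)) (pvM rs) := by
  unfold pvM
  simp only [List.foldl_cons]
  rw [foldl_max_acc]
  omega

theorem pvM_le (rs : List (List (String × String))) : pvM rs ≤ 4 := by
  induction rs with
  | nil => simp [pvM]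
  | cons r t ih =>
    rw [pvM_cons]
    have := pvPrio_le (pvRowStatusA r)
    omega

theorem pvM_ub (rs : List (List (String × String))) (r : List (String × String))
    (hr : r ∈ rs) : pvPrio (pvRowStatusA r) ≤ pvM rs := by
  induction rs with
  | nil => cases hr
  | cons x t ih =>
    rw [pvM_cons]
    rcases List.mem_cons.mp hr with h | h
    · subst h; omega
    · have := ih h; omega

theorem pvM_attained (rs : List (List (String × String))) :
    pvM rs = 0 ∨ ∃ r ∈ rs, pvPrio (pvRowStatusA r) = pvM rs := by
  induction rs with
  | nil => left; simp [pvM]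
  | cons x t ih =>
    rw [pvM_cons]
    by_cases h : pvPrio (pvRowStatusA x) ≥ pvM t
    · right; exact ⟨x, List.mem_cons_self, by omega⟩
    · rcases ih with h0 | ⟨r, hr, he⟩
      · omega
      · right; exact ⟨r, List.mem_cons_of_mem _ hr, by omega⟩

theorem not_mem_of_lt (rs : List (List (String × String))) (s : String)
    (h : pvM rs < pvPrio s) : ¬ ∃ r ∈ rs, pvRowStatusA r = s := by
  rintro ⟨r, hr, he⟩
  have := pvM_ub rs r hr
  rw [he] at this
  omega

theorem prio_val_A : pvPrio "A" = 4 := rfl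
theorem prio_val_M : pvPrio "M" = 3 := rfl
theorem prio_val_R : pvPrio "R" = 2 := rfl
theorem prio_val_I : pvPrio "I" = 1 := rfl

theorem status_of_prio (s : String) (m : Nat) (hm : pvPrio s = m) (h1 : 1 ≤ m) :
    (s = "A" ∧ m = 4) ∨ (s = "M" ∧ m = 3) ∨ (s = "R" ∧ m = 2) ∨ (s = "I" ∧ m = 1) := by
  rw [pvPrio_eq] at hm
  split_ifs at hm with hA hM hR hI
  · exact Or.inl ⟨hA, by omega⟩
  · exact Or.inr (Or.inl ⟨hM, by omega⟩)
  · exact Or.inr (Or.inr (Or.inl ⟨hR, by omega⟩))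
  · exact Or.inr (Or.inr (Or.inr ⟨hI, by omega⟩))
  · omega

-- ===== VERDICT (by name: the statement is the Claim_ definition above) =====
theorem get_cpl_status_py_spec : Claim_equal_get_cpl_status_py := by
  intro rs _ _
  unfold Spec_get_cpl_status_py get_cpl_status_py get_cpl_status_py_alt
  have halt : rs.foldl (fun best row => max best (pvPrio (pvRowStatusB row))) 0 = pvM rs := rfl
  rw [halt]
  have hle := pvM_le rs
  by_cases h0 : pvM rs = 0
  · -- max priority 0: none of the four statuses occurs
    rw [h0]
    have hA := not_mem_of_lt rs "A" (by rw [prio_val_A]; omega)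
    have hM := not_mem_of_lt rs "M" (by rw [prio_val_M]; omega)
    have hR := not_mem_of_lt rs "R" (by rw [prio_val_R]; omega)
    have hI := not_mem_of_lt rs "I" (by rw [prio_val_I]; omega)
    simp [hA, hM, hR, hI, pvStatusOf, PySem.Dict.get?]
  · obtain ⟨r, hr, he⟩ := (pvM_attained rs).resolve_left h0
    have h1 : 1 ≤ pvM rs := by omega
    · rcases status_of_prio _ _ he h1 with ⟨hs, hm⟩ | ⟨hs, hm⟩ | ⟨hs, hm⟩ | ⟨hs, hm⟩ <;>
        rw [hm]
      · have hc : ∃ a ∈ rs, pvRowStatusA a = "A" := ⟨r, hr, hs⟩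
        simp [hc, pvStatusOf, PySem.Dict.get?_mk_cons]
      · have hc : ∃ a ∈ rs, pvRowStatusA a = "M" := ⟨r, hr, hs⟩
        have hA := not_mem_of_lt rs "A" (by rw [prio_val_A]; omega)
        simp [hc, hA, pvStatusOf, PySem.Dict.get?_mk_cons]
      · have hc : ∃ a ∈ rs, pvRowStatusA a = "R" := ⟨r, hr, hs⟩
        have hA := not_mem_of_lt rs "A" (by rw [prio_val_A]; omega)
        have hM := not_mem_of_lt rs "M" (by rw [prio_val_M]; omega)
        simp [hc, hA, hM, pvStatusOf, PySem.Dict.get?_mk_cons]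
      · have hc : ∃ a ∈ rs, pvRowStatusA a = "I" := ⟨r, hr, hs⟩
        have hA := not_mem_of_lt rs "A" (by rw [prio_val_A]; omega)
        have hM := not_mem_of_lt rs "M" (by rw [prio_val_M]; omega)
        have hR := not_mem_of_lt rs "R" (by rw [prio_val_R]; omega)
        simp [hc, hA, hM, hR, pvStatusOf, PySem.Dict.get?_mk_cons]
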